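-- pv_equiv track=rewrite | github.com/sunny-ops/Amazon_OA | Find Earliest Month.py | findEarliestMonth
-- ===== SOURCE A (Python) =====
-- import math
--
-- def findEarliestMonth(stockPrice):
--   prefix = 0
--   total = sum(stockPrice)
--   n = len(stockPrice)
--   minimumPC = math.inf
--   for i in range(len(stockPrice) - 1):
--     prefix += stockPrice[i]
--     total -= stockPrice[i]
--     netPriceChange = abs(total // (n - i - 1) - prefix // (i + 1))
--
--     if netPriceChange < minimumPC:
--       ans = i + 1
--       minimumPC = netPriceChange
--
--   return ans
-- ===== SOURCE B (Python) =====
-- def findEarliestMonth(stockPrice):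
--     # Phase 1: prefix-sum table.
--     n = len(stockPrice)
--     P = []
--     s = 0
--     for x in stockPrice:
--         s += x
--         P.append(s)
--     total = P[-1]
--     # Phase 2: table of averaged-price differences, then earliest argmin.
--     diffs = [abs((total - P[i]) // (n - i - 1) - P[i] // (i + 1)) for i in range(n - 1)]
--     return 1 + min(range(n - 1), key=lambda i: diffs[i])
-- ===== Notes on version B (the rewrite author's own statement) =====
-- stated objective: alternative
-- what changed: B replaces A's single loop with running prefix/total accumulators by a two-phase decomposition: first build an explicit prefix-sum table P, then build the table of averaged-price differences and return the earliest argmin via min(range, key=...).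
import Mathlib
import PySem

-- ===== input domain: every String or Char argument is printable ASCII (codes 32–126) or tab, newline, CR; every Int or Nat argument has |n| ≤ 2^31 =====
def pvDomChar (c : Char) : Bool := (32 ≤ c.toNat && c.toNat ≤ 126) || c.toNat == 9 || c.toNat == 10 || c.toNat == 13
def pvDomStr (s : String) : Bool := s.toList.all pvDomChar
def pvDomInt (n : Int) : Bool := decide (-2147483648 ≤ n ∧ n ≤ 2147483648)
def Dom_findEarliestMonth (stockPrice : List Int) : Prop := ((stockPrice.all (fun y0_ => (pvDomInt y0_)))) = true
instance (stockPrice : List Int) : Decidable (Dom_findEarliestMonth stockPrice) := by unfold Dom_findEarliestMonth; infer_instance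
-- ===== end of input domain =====

-- B re-derives A's answer in two phases (explicit prefix-sum table, then a diff table + earliest argmin via min with key)
-- instead of A's single loop with running accumulators; same O(n) cost; equality proved on lists of length ≥ 2.


-- ===== PORT A =====
-- A's loop body: running prefix/total, minimumPC starts at math.inf (modelled as Option Int: none = inf),
-- ans assigned only when netPriceChange < minimumPC (Option Int: none = never assigned).
def aLoopBody (stockPrice : List Int) (s : Int × Int × Option Int × Option Int) (i : Int) :
    Int × Int × Option Int × Option Int :=
  let pfx := s.1 + PySem.List.pyGetD stockPrice i 0
  let tot := s.2.1 - PySem.List.pyGetD stockPrice i 0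
  let npc := |PySem.Int.floordiv tot ((stockPrice.length : Int) - i - 1) -
              PySem.Int.floordiv pfx (i + 1)|
  match s.2.2.1 with
  | none => (pfx, tot, some npc, some (i + 1))
  | some m => if npc < m then (pfx, tot, some npc, some (i + 1)) else (pfx, tot, some m, s.2.2.2)

def findEarliestMonth (stockPrice : List Int) : Int :=
  ((PySem.List.pyRange 0 ((stockPrice.length : Int) - 1) 1).foldl (aLoopBody stockPrice)
    (0, stockPrice.sum, none, none)).2.2.2.getD 0

def altPrefixTable (stockPrice : List Int) : Int × List Int :=
  stockPrice.foldl (fun acc x => (acc.1 + x, acc.2 ++ [acc.1 + x])) (0, [])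

def altDiffs (stockPrice : List Int) : List Int :=
  let n : Int := (stockPrice.length : Int)
  let P := (altPrefixTable stockPrice).2
  let total := PySem.List.pyGetD P (-1) 0
  (PySem.List.pyRange 0 (n - 1) 1).map
    (fun i => |PySem.Int.floordiv (total - PySem.List.pyGetD P i 0) (n - i - 1) -
               PySem.Int.floordiv (PySem.List.pyGetD P i 0) (i + 1)|)

def findEarliestMonth_alt (stockPrice : List Int) : Int :=
  1 + PySem.List.minD (PySem.List.pyRange 0 ((stockPrice.length : Int) - 1) 1)
        (fun i => PySem.List.pyGetD (altDiffs stockPrice) i 0) 0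

-- ===== PRECONDITION & SPEC =====
-- Pre_ excludes lists of length < 2: there A raises (UnboundLocalError — 'ans' is never assigned),
-- and B raises too (IndexError on [], ValueError from min on a 1-element list), so no value is claimed.
def Pre_findEarliestMonth (stockPrice : List Int) : Prop := 2 ≤ stockPrice.length
instance (stockPrice : List Int) : Decidable (Pre_findEarliestMonth stockPrice) := by
  unfold Pre_findEarliestMonth; infer_instance

def pvWitness_findEarliestMonth : List Int := [1, 5, 3]

def Spec_findEarliestMonth (stockPrice : List Int) (out : Int) : Prop := out = findEarliestMonth_alt stockPrice
instance (stockPrice : List Int) (out : Int) : Decidable (Spec_findEarliestMonth stockPrice out) := by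
  unfold Spec_findEarliestMonth; infer_instance

-- ===== CLAIM (what is proved, stated in full; the proofs are below) =====
def Claim_equal_findEarliestMonth : Prop := ∀ (stockPrice : List Int), Dom_findEarliestMonth stockPrice → Pre_findEarliestMonth stockPrice → Spec_findEarliestMonth stockPrice (findEarliestMonth stockPrice)

-- ===== LEMMAS AND PROOFS =====

-- pvQ sp k = sum of the first (k+1) prices = B's table entry P[k]; pvF sp k = the month-k averaged diff;
-- pvBest sp m = earliest argmin of pvF over [0, m) (none iff m = 0).
def pvQ (sp : List Int) (k : Nat) : Int := (sp.take (k+1)).sum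

def pvF (sp : List Int) (k : Nat) : Int :=
  |PySem.Int.floordiv (sp.sum - pvQ sp k) ((sp.length : Int) - (k : Int) - 1) -
   PySem.Int.floordiv (pvQ sp k) ((k : Int) + 1)|

def pvBest (sp : List Int) (m : Nat) : Option Nat :=
  (List.range m).foldl
    (fun acc k => match acc with
      | none => some k
      | some b => if pvF sp k < pvF sp b then some k else some b) none

theorem pvBest_lt (sp : List Int) (m : Nat) : ∀ b, pvBest sp m = some b → b < m := by
  induction m with
  | zero => intro b h; simp [pvBest] at h
  | succ m ih =>
    intro b h
    unfold pvBest at h ih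
    rw [List.range_succ, List.foldl_append, List.foldl_cons, List.foldl_nil] at h
    rcases hp : (List.range m).foldl
        (fun acc k => match acc with
          | none => some k
          | some b => if pvF sp k < pvF sp b then some k else some b) none with _ | b'
    · rw [hp] at h; simp at h; omega
    · rw [hp] at h; simp at h
      split_ifs at h <;> simp at h <;> [omega; skip]
      have := ih b' hp; omega

theorem pvBest_succ (sp : List Int) (m : Nat) :
    pvBest sp (m+1) = match pvBest sp m with
      | none => some m
      | some b => if pvF sp m < pvF sp b then some m else some b := by
  unfold pvBest
  rw [List.range_succ, List.foldl_append, List.foldl_cons, List.foldl_nil]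

theorem pvBest_isSome (sp : List Int) (m : Nat) (h : 1 ≤ m) : (pvBest sp m).isSome := by
  obtain ⟨m', rfl⟩ : ∃ m', m = m' + 1 := ⟨m - 1, by omega⟩
  rw [pvBest_succ]
  rcases pvBest sp m' with _ | b <;> simp
  split_ifs <;> simp

theorem pvTable (xs : List Int) (s : Int) (acc : List Int) :
    (xs.foldl (fun a x => (a.1 + x, a.2 ++ [a.1 + x])) (s, acc)) =
      (s + xs.sum, acc ++ (List.range xs.length).map (fun k => s + (xs.take (k+1)).sum)) := by
  induction xs generalizing s acc with
  | nil => simp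
  | cons x xs ih =>
    simp only [List.foldl_cons]
    rw [ih]
    simp [List.range_succ_eq_map, List.map_map, Function.comp, add_assoc]

theorem pvP_eq (sp : List Int) :
    (altPrefixTable sp).2 = (List.range sp.length).map (pvQ sp) := by
  rw [altPrefixTable, pvTable]
  simp [pvQ]

theorem pvRange_cast (n : Nat) :
    PySem.List.pyRange 0 ((n : Int) - 1) 1 = (List.range (n - 1)).map (fun k : Nat => (k : Int)) := by
  rw [PySem.List.pyRange_one]
  have h1 : (((n : Int) - 1) - 0).toNat = n - 1 := by omega
  rw [h1]
  simp

theorem pvDiffs_get (sp : List Int) (hn : 2 ≤ sp.length) (k : Nat) (hk : k < sp.length - 1) :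
    PySem.List.pyGetD (altDiffs sp) (k : Int) 0 = pvF sp k := by
  have hP : (altPrefixTable sp).2 = (List.range sp.length).map (pvQ sp) := pvP_eq sp
  have hPk : ∀ j : Nat, j < sp.length → PySem.List.pyGetD (altPrefixTable sp).2 (j : Int) 0 = pvQ sp j := by
    intro j hj
    rw [hP, PySem.List.pyGetD_natCast, List.getD_eq_getElem _ _ (by simpa using hj)]
    simp
  have htotal : PySem.List.pyGetD (altPrefixTable sp).2 (-1) 0 = sp.sum := by
    rw [hP]
    have hlen1 : ((List.range sp.length).map (pvQ sp)).length = sp.length := by simp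
    have hne : (List.range sp.length).map (pvQ sp) ≠ [] := by
      intro h; rw [h] at hlen1; simp at hlen1; omega
    rw [PySem.List.pyGetD_neg_one _ _ hne, List.getLast_eq_getElem]
    simp only [List.length_map, List.length_range, List.getElem_map, List.getElem_range]
    unfold pvQ
    rw [Nat.sub_add_cancel (by omega), List.take_length]
  unfold altDiffs
  simp only [pvRange_cast, List.map_map]
  rw [PySem.List.pyGetD_natCast, List.getD_eq_getElem _ _ (by simpa using hk)]
  simp only [List.getElem_map, List.getElem_range, Function.comp]
  rw [hPk k (by omega), htotal]
  rfl

theorem pvMin_eq (sp : List Int) (hn : 2 ≤ sp.length) (m : Nat) (hm : m ≤ sp.length - 1) :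
    PySem.List.min? ((List.range m).map (fun k : Nat => (k : Int)))
      (fun i => PySem.List.pyGetD (altDiffs sp) i 0)
    = Option.map (fun b : Nat => (b : Int)) (pvBest sp m) := by
  induction m with
  | zero => simp [PySem.List.min?, pvBest]
  | succ m ih =>
    unfold PySem.List.min? at ih ⊢
    rw [List.range_succ, List.map_append, List.foldl_append, ih (by omega),
        List.map_cons, List.map_nil, List.foldl_cons, List.foldl_nil, pvBest_succ]
    rcases hb : pvBest sp m with _ | bb
    · simp
    · have hbm : bb < m := pvBest_lt sp m bb hb
      simp only [Option.map_some, pvDiffs_get sp hn m (by omega : m < sp.length - 1),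
                 pvDiffs_get sp hn bb (by omega : bb < sp.length - 1)]
      split_ifs <;> simp

theorem pvAfold (sp : List Int) (hn : 2 ≤ sp.length) (m : Nat) (hm : m ≤ sp.length - 1) :
    (List.range m).foldl (fun s (k : Nat) => aLoopBody sp s ((k : Int))) (0, sp.sum, none, none)
    = ((sp.take m).sum, sp.sum - (sp.take m).sum,
       Option.map (pvF sp) (pvBest sp m), Option.map (fun b : Nat => ((b : Int) + 1)) (pvBest sp m)) := by
  induction m with
  | zero => simp [pvBest]
  | succ m ih =>
    rw [List.range_succ, List.foldl_append, List.foldl_cons, List.foldl_nil, ih (by omega)]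
    have hmlt : m < sp.length := by omega
    have hget : PySem.List.pyGetD sp ((m : Int)) 0 = sp[m] := by
      rw [PySem.List.pyGetD_natCast, List.getD_eq_getElem _ _ hmlt]
    have htake : (sp.take (m+1)).sum = (sp.take m).sum + sp[m] := by
      rw [List.take_add_one, List.getElem?_eq_getElem hmlt, List.sum_append]; simp
    have hnpc : |PySem.Int.floordiv (sp.sum - (sp.take m).sum - sp[m]) ((sp.length : Int) - (m : Int) - 1) -
                 PySem.Int.floordiv ((sp.take m).sum + sp[m]) ((m : Int) + 1)| = pvF sp m := by
      unfold pvF pvQ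
      rw [htake, ← sub_sub]
    have hstep : ∀ (X : Option Int) (Y : Option Int),
        aLoopBody sp ((sp.take m).sum, sp.sum - (sp.take m).sum, X, Y) ((m : Int))
        = match X with
          | none => ((sp.take (m+1)).sum, sp.sum - (sp.take (m+1)).sum, some (pvF sp m), some ((m : Int) + 1))
          | some d => if pvF sp m < d
              then ((sp.take (m+1)).sum, sp.sum - (sp.take (m+1)).sum, some (pvF sp m), some ((m : Int) + 1))
              else ((sp.take (m+1)).sum, sp.sum - (sp.take (m+1)).sum, some d, Y) := by
      intro X Y
      have e1 : (sp.take m).sum + sp[m] = (sp.take (m+1)).sum := by omega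
      have e2 : sp.sum - (sp.take m).sum - sp[m] = sp.sum - (sp.take (m+1)).sum := by omega
      cases X with
      | none =>
        simp only [aLoopBody, hget, hnpc]
        rw [e1, e2]
      | some d =>
        simp only [aLoopBody, hget, hnpc]
        split_ifs with h1 <;> rw [e1, e2]
    rw [hstep, pvBest_succ]
    rcases hb : pvBest sp m with _ | b
    · rfl
    · simp only [Option.map_some]
      split_ifs <;> rfl

theorem pvMain (sp : List Int) (hpre : 2 ≤ sp.length) :
    findEarliestMonth sp = findEarliestMonth_alt sp := by
  obtain ⟨b, hb⟩ := Option.isSome_iff_exists.mp (pvBest_isSome sp (sp.length - 1) (by omega))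
  have hA : findEarliestMonth sp = (b : Int) + 1 := by
    unfold findEarliestMonth
    rw [pvRange_cast, List.foldl_map, pvAfold sp hpre (sp.length - 1) le_rfl, hb]
    rfl
  have hB : findEarliestMonth_alt sp = 1 + (b : Int) := by
    unfold findEarliestMonth_alt PySem.List.minD
    rw [pvRange_cast, pvMin_eq sp hpre (sp.length - 1) le_rfl, hb]
    rfl
  rw [hA, hB, add_comm]

-- ===== VERDICT (by name: the statement is the Claim_ definition above) =====
theorem findEarliestMonth_spec : Claim_equal_findEarliestMonth := by
  intro sp _ hpre
  unfold Spec_findEarliestMonth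
  exact pvMain sp hpre
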